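-- pv_equiv track=rewrite | github.com/adf1178/multi-lingual-code-gen | evaluation/vllm-x-eval.py | remove_after_main
-- ===== SOURCE A (Python) =====
-- def remove_after_main(code):
--     lines = code.split('\n')
--     new_lines = []
--     for line in lines:
--         if line.startswith('int main') or line.startswith('public class') or line.startswith('\'\'\''):
--             break
--         new_lines.append(line)
--     new_code = '\n'.join(new_lines)
--     return new_code
-- ===== SOURCE B (Python) =====
-- def remove_after_main(code):
--     markers = ('int main', 'public class', "'''")
--     pos = 0
--     while True:
--         if code.startswith(markers, pos):
--             return code[:pos - 1] if pos else ''
--         nl = code.find('\n', pos)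
--         if nl == -1:
--             return code
--         pos = nl + 1
-- ===== Notes on version B (the rewrite author's own statement) =====
-- stated objective: alternative
-- what changed: B replaces A's split-into-lines / accumulate / re-join pipeline by a scan-and-slice over the raw string: it walks line starts with startswith(markers, pos) and a newline search from pos, and returns one slice code[:pos-1] (or code, or the empty string), never building a line list.
import Mathlib
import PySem

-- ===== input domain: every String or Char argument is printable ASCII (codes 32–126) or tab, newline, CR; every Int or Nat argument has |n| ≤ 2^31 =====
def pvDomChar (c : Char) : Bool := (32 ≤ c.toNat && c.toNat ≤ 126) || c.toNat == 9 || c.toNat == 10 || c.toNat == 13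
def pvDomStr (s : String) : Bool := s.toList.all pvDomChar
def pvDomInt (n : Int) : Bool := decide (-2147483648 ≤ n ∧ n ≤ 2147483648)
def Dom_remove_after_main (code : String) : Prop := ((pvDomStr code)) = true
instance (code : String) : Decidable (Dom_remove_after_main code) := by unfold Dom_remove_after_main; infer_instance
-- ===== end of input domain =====

-- B replaces A's split-lines/accumulate/re-join pipeline by a single scan over the raw
-- string that finds the first marker line start and returns one slice; same return value.

-- ===== PORT A =====
-- for line in lines: break on marker, else append; acc is new_lines
def pvALoop : List (List Char) → List (List Char) → List (List Char)
  | [], acc => acc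
  | l :: ls, acc =>
    if PySem.Chars.startswith l "int main".toList || PySem.Chars.startswith l "public class".toList
        || PySem.Chars.startswith l "'''".toList then acc
    else pvALoop ls (acc ++ [l])

def remove_after_main (code : String) : String :=
  let lines := PySem.Chars.splitOn code.toList "\n".toList
  let new_lines := pvALoop lines []
  String.ofList (PySem.Chars.join "\n".toList new_lines)

-- ===== PORT B =====
-- code.startswith(markers, pos) applied to the suffix code[pos:]
def pvStartsAny (cs : List Char) : Bool :=
  PySem.Chars.startswith cs "int main".toList || PySem.Chars.startswith cs "public class".toList
    || PySem.Chars.startswith cs "'''".toList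

-- B's while loop over positions, as recursion on the suffix code[pos:]; returns the
-- offset (from the current pos) of the first marker line start, none if there is none.
def pvBScan (cs : List Char) : Option Nat :=
  if pvStartsAny cs then some 0
  else
    let nl := PySem.Chars.find cs "\n".toList
    if _hnl : nl = -1 then none
    else
      match pvBScan (cs.drop (nl.toNat + 1)) with
      | none => none
      | some p => some (nl.toNat + 1 + p)
termination_by cs.length
decreasing_by
  have h1 := PySem.Chars.neg_one_le_find cs "\n".toList
  have h0 : (0:Int) ≤ PySem.Chars.find cs "\n".toList := by omega
  have h2 : ("\n".toList) <:+: cs := (PySem.Chars.find_nonneg_iff _ _).mp h0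
  have h3 : cs ≠ [] := by rintro rfl; simp at h2
  have h4 : 0 < cs.length := List.length_pos_iff.mpr h3
  simp only [List.length_drop]; omega

def remove_after_main_alt (code : String) : String :=
  match pvBScan code.toList with
  | none => code
  | some 0 => ""
  | some p => String.ofList (code.toList.take (p - 1))

-- ===== PRECONDITION & SPEC =====
def Spec_remove_after_main (code : String) (out : String) : Prop := out = remove_after_main_alt code
instance (code : String) (out : String) : Decidable (Spec_remove_after_main code out) := by unfold Spec_remove_after_main; infer_instance

-- ===== CLAIM (what is proved, stated in full; the proofs are below) =====
def Claim_equal_remove_after_main : Prop := ∀ (code : String), Dom_remove_after_main code → Spec_remove_after_main code (remove_after_main code)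

-- ===== LEMMAS AND PROOFS =====

-- splitOn.go: a trailing singleton accumulator pops out in front
lemma pvGoAcc (sep : List Char) : ∀ (fuel : Nat) (l cur : List Char) (acc : List (List Char)) (a : List Char),
    PySem.Chars.splitOn.go sep fuel l cur (acc ++ [a]) = a :: PySem.Chars.splitOn.go sep fuel l cur acc := by
  intro fuel
  induction fuel with
  | zero => intro l cur acc a; simp [PySem.Chars.splitOn.go]
  | succ f ih =>
    intro l cur acc a
    cases l with
    | nil => simp [PySem.Chars.splitOn.go]
    | cons c rest =>
      rw [PySem.Chars.splitOn.go, PySem.Chars.splitOn.go]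
      split
      · rw [show (cur.reverse :: (acc ++ [a])) = (cur.reverse :: acc) ++ [a] by simp, ih]
      · exact ih _ _ _ _

-- splitOn.go on a newline-free remainder
lemma pvGoNosep : ∀ (l : List Char), '\n' ∉ l → ∀ (fuel : Nat) (cur : List Char) (acc : List (List Char)),
    PySem.Chars.splitOn.go ['\n'] fuel l cur acc = ((cur.reverse ++ l) :: acc).reverse := by
  intro l
  induction l with
  | nil =>
    intro _ fuel cur acc
    cases fuel <;> simp [PySem.Chars.splitOn.go]
  | cons c rest ih =>
    intro h fuel cur acc
    cases fuel with
    | zero => simp [PySem.Chars.splitOn.go]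
    | succ f =>
      rw [PySem.Chars.splitOn.go]
      have hc : c ≠ '\n' := by simp at h; tauto
      have hp : ['\n'].isPrefixOf (c :: rest) = false := by
        simp [List.isPrefixOf]; exact fun hcc => absurd hcc.symm hc
      rw [if_neg (by simp [hp])]
      rw [ih (by simp at h; tauto) f (c :: cur) acc]
      simp

-- splitOn.go eats one full line
lemma pvGoSep : ∀ (l : List Char), '\n' ∉ l → ∀ (fuel : Nat) (rest cur : List Char) (acc : List (List Char)),
    l.length + 1 ≤ fuel →
    PySem.Chars.splitOn.go ['\n'] fuel (l ++ '\n' :: rest) cur acc =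
      PySem.Chars.splitOn.go ['\n'] (fuel - (l.length + 1)) rest [] ((cur.reverse ++ l) :: acc) := by
  intro l
  induction l with
  | nil =>
    intro _ fuel rest cur acc hf
    cases fuel with
    | zero => omega
    | succ f =>
      rw [List.nil_append, PySem.Chars.splitOn.go]
      rw [if_pos (by simp [List.isPrefixOf])]
      simp
  | cons c l' ih =>
    intro h fuel rest cur acc hf
    cases fuel with
    | zero => omega
    | succ f =>
      rw [List.cons_append, PySem.Chars.splitOn.go]
      have hc : c ≠ '\n' := by simp at h; tauto
      have hp : ['\n'].isPrefixOf (c :: (l' ++ '\n' :: rest)) = false := by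
        simp [List.isPrefixOf]; exact fun hcc => absurd hcc.symm hc
      rw [if_neg (by simp [hp])]
      have hf' : l'.length + 1 ≤ f := by simp at hf; omega
      rw [ih (by simp at h; tauto) f rest (c :: cur) acc hf']
      simp

lemma pvSplitNosep (cs : List Char) (h : '\n' ∉ cs) : PySem.Chars.splitOn cs ['\n'] = [cs] := by
  rw [PySem.Chars.splitOn, pvGoNosep cs h]; simp

lemma pvSplitCons (l rest : List Char) (h : '\n' ∉ l) :
    PySem.Chars.splitOn (l ++ '\n' :: rest) ['\n'] = l :: PySem.Chars.splitOn rest ['\n'] := by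
  rw [PySem.Chars.splitOn, pvGoSep l h _ rest [] [] (by simp)]
  have hlen : (l ++ '\n' :: rest).length + 1 - (l.length + 1) = rest.length + 1 := by simp
  rw [hlen]
  rw [show (([[].reverse ++ l]) : List (List Char)) = [] ++ [[].reverse ++ l] from rfl]
  rw [pvGoAcc]
  simp [PySem.Chars.splitOn]

lemma pvGoNeNil (sep : List Char) : ∀ (fuel : Nat) (l cur : List Char) (acc : List (List Char)),
    PySem.Chars.splitOn.go sep fuel l cur acc ≠ [] := by
  intro fuel
  induction fuel with
  | zero => intro l cur acc; simp [PySem.Chars.splitOn.go]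
  | succ f ih =>
    intro l cur acc
    cases l with
    | nil => simp [PySem.Chars.splitOn.go]
    | cons c rest =>
      rw [PySem.Chars.splitOn.go]
      split
      · exact ih _ _ _
      · exact ih _ _ _

lemma pvSplitNeNil (cs : List Char) : PySem.Chars.splitOn cs ['\n'] ≠ [] := pvGoNeNil _ _ _ _ _

-- the decomposition of cs at the first newline, read off PySem.Chars.find
lemma pvFindDecomp (cs : List Char) (h : 0 ≤ PySem.Chars.find cs ['\n']) :
    '\n' ∉ cs.take (PySem.Chars.find cs ['\n']).toNat ∧
    cs = cs.take (PySem.Chars.find cs ['\n']).toNat ++ '\n' :: cs.drop ((PySem.Chars.find cs ['\n']).toNat + 1) := by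
  have hne : PySem.Chars.findFrom cs ['\n'] (0:Int) none ≠ -1 := by
    rw [PySem.Chars.findFrom_zero]; omega
  have hspec := PySem.Chars.findFrom_natCast_spec cs ['\n'] 0 (Nat.zero_le _) (by simpa using hne)
  rw [show ((0:Nat):Int) = (0:Int) by norm_num, PySem.Chars.findFrom_zero] at hspec
  obtain ⟨-, hpre, hmin⟩ := hspec
  set n := (PySem.Chars.find cs ['\n']).toNat with hn
  obtain ⟨t, ht⟩ := hpre
  have hlt : n < cs.length := by
    have := congrArg List.length ht
    simp [List.length_drop] at this
    omega
  have hget : cs[n] = '\n' := by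
    have h2 := List.getElem_of_eq ht.symm (show 0 < (cs.drop n).length by simp; omega)
    simpa using h2
  constructor
  · intro hmem
    obtain ⟨i, hi, hgi⟩ := List.mem_iff_getElem.mp hmem
    have hilen : i < n := by simp at hi; omega
    have hicl : i < cs.length := by omega
    have : (['\n'] : List Char) <+: cs.drop i := by
      refine ⟨cs.drop (i+1), ?_⟩
      have hgi' : cs[i] = '\n' := by simpa [List.getElem_take] using hgi
      rw [show (['\n'] : List Char) ++ cs.drop (i+1) = cs[i] :: cs.drop (i+1) by rw [hgi']; rfl]
      exact (List.drop_eq_getElem_cons hicl).symm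
    exact hmin i (Nat.zero_le _) hilen this
  · conv_lhs => rw [← List.take_append_drop n cs]
    congr 1
    rw [List.drop_eq_getElem_cons hlt, hget]

-- a newline-free marker is a prefix of the first line iff of the whole string
lemma pvMarkerLine (m l rest : List Char) (hm : '\n' ∉ m) :
    PySem.Chars.startswith (l ++ '\n' :: rest) m = PySem.Chars.startswith l m := by
  by_cases h : PySem.Chars.startswith l m = true
  case pos =>
    rw [h]
    rw [PySem.Chars.startswith_iff] at h ⊢
    exact h.trans (List.prefix_append l _)
  case neg =>
    rw [Bool.eq_false_iff.mpr h, Bool.eq_false_iff]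
    intro hc
    rw [PySem.Chars.startswith_iff] at hc
    obtain ⟨t, ht⟩ := hc
    by_cases hlen : m.length ≤ l.length
    case pos =>
      apply h
      rw [PySem.Chars.startswith_iff]
      have hm2 : m = l.take m.length := by
        have h3 := congrArg (List.take m.length) ht
        simpa [List.take_append_of_le_length hlen,
          List.take_of_length_le (le_refl m.length)] using h3
      rw [hm2]; exact List.take_prefix _ _
    case neg =>
      rw [not_le] at hlen
      apply hm
      have hidx : (m ++ t)[l.length]'(by simp; omega) = '\n' := by
        have h4 := List.getElem_of_eq ht (show l.length < (m ++ t).length by simp; omega)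
        rw [h4, List.getElem_append_right (le_refl l.length)]
        simp
      rw [List.getElem_append_left hlen] at hidx
      rw [← hidx]; exact List.getElem_mem _

-- B's whole-string marker test equals A's first-line marker test
lemma pvStartsAnyLine (l rest : List Char) :
    pvStartsAny (l ++ '\n' :: rest) = pvStartsAny l := by
  unfold pvStartsAny
  rw [pvMarkerLine _ _ _ (by decide), pvMarkerLine _ _ _ (by decide), pvMarkerLine _ _ _ (by decide)]

lemma pvALoopCons (l : List Char) (ls acc : List (List Char)) :
    pvALoop (l :: ls) acc = if pvStartsAny l then acc else pvALoop ls (acc ++ [l]) := by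
  rw [pvALoop, pvStartsAny]

lemma pvALoopAcc : ∀ (ls acc : List (List Char)), pvALoop ls acc = acc ++ pvALoop ls [] := by
  intro ls
  induction ls with
  | nil => intro acc; simp [pvALoop]
  | cons l ls ih =>
    intro acc
    rw [pvALoop, pvALoop]
    split
    · simp
    · rw [ih (acc ++ [l]), ih ([] ++ [l])]
      simp

-- A breaks on the very first line iff B's marker test fires at position 0
lemma pvNotMemOfFindNeg (cs : List Char) (hf : PySem.Chars.find cs ['\n'] = -1) : '\n' ∉ cs := by
  intro hmem
  obtain ⟨s, t, hst⟩ := List.append_of_mem hmem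
  have : (['\n'] : List Char) <:+: cs := ⟨s, t, by rw [hst]; simp⟩
  exact ((PySem.Chars.find_eq_neg_one_iff cs ['\n']).mp hf) this

lemma pvALoopNilIff (cs : List Char) :
    pvALoop (PySem.Chars.splitOn cs ['\n']) [] = [] ↔ pvStartsAny cs = true := by
  by_cases hf : PySem.Chars.find cs ['\n'] = -1
  case pos =>
    rw [pvSplitNosep cs (pvNotMemOfFindNeg cs hf), pvALoopCons]
    split
    case isTrue h => simpa using h
    case isFalse h => simp [pvALoop]; simpa using h
  case neg =>
    have h0 : 0 ≤ PySem.Chars.find cs ['\n'] := by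
      have := PySem.Chars.neg_one_le_find cs ['\n']; omega
    obtain ⟨hnl, heq⟩ := pvFindDecomp cs h0
    have hsplit : PySem.Chars.splitOn cs ['\n'] =
        cs.take (PySem.Chars.find cs ['\n']).toNat ::
          PySem.Chars.splitOn (cs.drop ((PySem.Chars.find cs ['\n']).toNat + 1)) ['\n'] := by
      conv_lhs => rw [heq, pvSplitCons _ _ hnl]
    have hline : pvStartsAny cs = pvStartsAny (cs.take (PySem.Chars.find cs ['\n']).toNat) := by
      conv_lhs => rw [heq, pvStartsAnyLine]
    rw [hsplit, pvALoopCons, hline]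
    split
    case isTrue h => simpa using h
    case isFalse h =>
      rw [pvALoopAcc]
      simp
      simpa using h

lemma pvBScanSome0Iff (cs : List Char) : pvBScan cs = some 0 ↔ pvStartsAny cs = true := by
  constructor
  · intro h
    rw [pvBScan] at h
    by_cases hm : pvStartsAny cs = true
    · exact hm
    · rw [if_neg hm] at h
      by_cases hf : PySem.Chars.find cs "\n".toList = -1
      · simp only [dif_pos hf] at h; cases h
      · simp only [dif_neg hf] at h
        cases hbr : pvBScan (cs.drop ((PySem.Chars.find cs "\n".toList).toNat + 1)) with
        | none => rw [hbr] at h; cases h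
        | some p => rw [hbr] at h; simp at h
  · intro h; rw [pvBScan, if_pos h]

-- the main invariant, by strong induction on the length
lemma pvMain : ∀ (n : Nat) (cs : List Char), cs.length ≤ n →
    (pvBScan cs = none → pvALoop (PySem.Chars.splitOn cs ['\n']) [] = PySem.Chars.splitOn cs ['\n']) ∧
    PySem.Chars.join ['\n'] (pvALoop (PySem.Chars.splitOn cs ['\n']) []) =
      (match pvBScan cs with
       | none => cs
       | some p => cs.take (p - 1)) := by
  intro n
  induction n with
  | zero =>
    intro cs hlen
    have hcs : cs = [] := List.eq_nil_of_length_eq_zero (by omega)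
    subst hcs
    have hb : pvBScan [] = none := by
      rw [pvBScan, if_neg (by decide), dif_pos (by decide)]
    rw [hb, pvSplitNosep [] (by simp)]
    refine ⟨fun _ => ?_, ?_⟩
    · rw [pvALoopCons, if_neg (by decide)]; rfl
    · rw [pvALoopCons, if_neg (by decide)]
      simp [pvALoop, PySem.Chars.join_singleton]
  | succ n ih =>
    intro cs hlen
    by_cases hm : pvStartsAny cs = true
    case pos =>
      have hb : pvBScan cs = some 0 := (pvBScanSome0Iff cs).mpr hm
      refine ⟨by rw [hb]; simp, ?_⟩
      rw [hb, (pvALoopNilIff cs).mpr hm, PySem.Chars.join_nil]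
      simp
    case neg =>
      have hm' : pvStartsAny cs = false := Bool.eq_false_iff.mpr hm
      by_cases hf : PySem.Chars.find cs ['\n'] = -1
      case pos =>
        have hb : pvBScan cs = none := by
          rw [pvBScan, if_neg (by simp [hm']), dif_pos (by simpa using hf)]
        have hA : pvALoop (PySem.Chars.splitOn cs ['\n']) [] = PySem.Chars.splitOn cs ['\n'] := by
          rw [pvSplitNosep cs (pvNotMemOfFindNeg cs hf), pvALoopCons, if_neg (by simp [hm'])]
          rfl
        refine ⟨fun _ => hA, ?_⟩
        rw [hb, hA, pvSplitNosep cs (pvNotMemOfFindNeg cs hf), PySem.Chars.join_singleton]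
      case neg =>
        have h0 : 0 ≤ PySem.Chars.find cs ['\n'] := by
          have := PySem.Chars.neg_one_le_find cs ['\n']; omega
        obtain ⟨hnl, heq⟩ := pvFindDecomp cs h0
        set N := (PySem.Chars.find cs ['\n']).toNat with hN
        have hNlt : N < cs.length := by
          have := congrArg List.length heq
          simp at this
          omega
        have hlN : (cs.take N).length = N := by simp; omega
        have hrlen : (cs.drop (N+1)).length ≤ n := by simp; omega
        have ihr := ih (cs.drop (N+1)) hrlen
        have hsplit : PySem.Chars.splitOn cs ['\n'] =
            cs.take N :: PySem.Chars.splitOn (cs.drop (N+1)) ['\n'] := by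
          conv_lhs => rw [heq, pvSplitCons _ _ hnl]
        have hline : pvStartsAny (cs.take N) = false := by
          have h2 : pvStartsAny cs = pvStartsAny (cs.take N) := by
            conv_lhs => rw [heq, pvStartsAnyLine]
          rw [← h2]; exact hm'
        have hbeq : pvBScan cs = (match pvBScan (cs.drop (N + 1)) with
            | none => none
            | some p => some (N + 1 + p)) := by
          rw [pvBScan, if_neg (by simp [hm'])]
          rw [show ("\n".toList : List Char) = ['\n'] from by decide]
          rw [dif_neg hf]
        have hAcons : pvALoop (PySem.Chars.splitOn cs ['\n']) [] =
            cs.take N :: pvALoop (PySem.Chars.splitOn (cs.drop (N+1)) ['\n']) [] := by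
          rw [hsplit, pvALoopCons, if_neg (by simp [hline]), pvALoopAcc]
          rfl
        cases hbr : pvBScan (cs.drop (N+1)) with
        | none =>
          have hb : pvBScan cs = none := by rw [hbeq, hbr]
          have hQ : pvALoop (PySem.Chars.splitOn (cs.drop (N+1)) ['\n']) [] =
              PySem.Chars.splitOn (cs.drop (N+1)) ['\n'] := ihr.1 hbr
          have hJ := ihr.2
          rw [hbr] at hJ
          refine ⟨fun _ => by rw [hAcons, hQ, hsplit], ?_⟩
          rw [hb, hAcons, hQ]
          obtain ⟨k, ks, hkk⟩ := List.exists_cons_of_ne_nil (pvSplitNeNil (cs.drop (N+1)))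
          rw [hkk, PySem.Chars.join_cons_cons, ← hkk]
          rw [hQ] at hJ
          rw [hJ]
          conv_rhs => rw [heq]
          simp
        | some p =>
          have hb : pvBScan cs = some (N + 1 + p) := by rw [hbeq, hbr]
          refine ⟨by rw [hb]; simp, ?_⟩
          have hJ := ihr.2
          rw [hbr] at hJ
          rw [hb, hAcons]
          cases p with
          | zero =>
            have hK : pvALoop (PySem.Chars.splitOn (cs.drop (N+1)) ['\n']) [] = [] :=
              (pvALoopNilIff _).mpr ((pvBScanSome0Iff _).mp hbr)
            rw [hK, PySem.Chars.join_singleton]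
            show List.take N cs = List.take (N + 1 + 0 - 1) cs
            simp
          | succ q =>
            have hKne : pvALoop (PySem.Chars.splitOn (cs.drop (N+1)) ['\n']) [] ≠ [] := by
              intro hK
              have h3 : pvBScan (cs.drop (N+1)) = some 0 :=
                (pvBScanSome0Iff _).mpr ((pvALoopNilIff _).mp hK)
              rw [hbr] at h3
              simp at h3
            obtain ⟨k, ks, hkk⟩ := List.exists_cons_of_ne_nil hKne
            rw [hkk, PySem.Chars.join_cons_cons, ← hkk, hJ]
            show List.take N cs ++ ['\n'] ++ List.take ((q + 1) - 1) (List.drop (N + 1) cs) =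
              List.take (N + 1 + (q + 1) - 1) cs
            have hR : cs.take (N + 1 + (q + 1) - 1) = cs.take N ++ '\n' :: (cs.drop (N+1)).take q := by
              conv_lhs => rw [heq]
              rw [show N + 1 + (q + 1) - 1 = (cs.take N).length + (q + 1) by omega]
              rw [List.take_append, hlN]
              have h5 : N + (q + 1) - N = q + 1 := by omega
              rw [h5, List.take_take]
              simp
            rw [hR]
            simp

-- ===== VERDICT (by name: the statement is the Claim_ definition above) =====
theorem remove_after_main_spec : Claim_equal_remove_after_main := by
  intro code _
  unfold Spec_remove_after_main remove_after_main remove_after_main_alt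
  have h := (pvMain code.toList.length code.toList le_rfl).2
  rw [show ("\n".toList : List Char) = ['\n'] from by decide]
  show String.ofList (PySem.Chars.join ['\n'] (pvALoop (PySem.Chars.splitOn code.toList ['\n']) [])) = _
  cases hb : pvBScan code.toList with
  | none =>
    rw [hb] at h
    have h' : PySem.Chars.join ['\n'] (pvALoop (PySem.Chars.splitOn code.toList ['\n']) []) =
        code.toList := h
    rw [h', String.ofList_toList]
  | some p =>
    rw [hb] at h
    cases p with
    | zero =>
      have h' : PySem.Chars.join ['\n'] (pvALoop (PySem.Chars.splitOn code.toList ['\n']) []) =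
          [] := h
      rw [h']
    | succ q =>
      have h' : PySem.Chars.join ['\n'] (pvALoop (PySem.Chars.splitOn code.toList ['\n']) []) =
          code.toList.take (q + 1 - 1) := h
      rw [h']
      rfl
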